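-- pv_equiv track=rewrite | github.com/kentang2017/kinastro | astro/nine_star_ki.py | compute_annual_star
-- ===== SOURCE A (Python) =====
-- def compute_annual_star(target_year: int) -> int:
--     """Compute the Annual Flying Star (流年星) for *target_year*.
--
--     The annual star is the star occupying the center palace (中宮) in the
--     given solar year. It follows the same formula as the year star but
--     applied to the target year directly.
--     """
--     n = sum(int(d) for d in str(target_year))
--     while n > 10:
--         n = sum(int(d) for d in str(n))
--     star = 11 - n
--     if star <= 0:
--         star += 9
--     return star
-- ===== SOURCE B (Python) =====
-- def compute_annual_star(target_year: int) -> int: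
--     """Compute the Annual Flying Star (流年星) for *target_year*.
--
--     Arithmetic re-implementation: digit sums via %10 // 10 and the
--     repeated reduction as a recursive fixpoint instead of a while loop
--     over str() round-trips.
--     """
--     def digit_sum(n):
--         s = 0
--         while n > 0:
--             s += n % 10
--             n //= 10
--         return s
--
--     def reduce(n):
--         return n if n <= 10 else reduce(digit_sum(n))
--
--     star = 11 - reduce(digit_sum(target_year))
--     return star if star > 0 else star + 9
-- ===== Notes on version B (the rewrite author's own statement) =====
-- stated objective: alternative
-- what changed: Replaces the string-based digit extraction (sum(int(d) for d in str(n))) and the explicit while-loop with an arithmetic %10 // 10 digit sum and a recursive fixpoint reduce(n) = n if n <= 10 else reduce(digit_sum(n)).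
import Mathlib
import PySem

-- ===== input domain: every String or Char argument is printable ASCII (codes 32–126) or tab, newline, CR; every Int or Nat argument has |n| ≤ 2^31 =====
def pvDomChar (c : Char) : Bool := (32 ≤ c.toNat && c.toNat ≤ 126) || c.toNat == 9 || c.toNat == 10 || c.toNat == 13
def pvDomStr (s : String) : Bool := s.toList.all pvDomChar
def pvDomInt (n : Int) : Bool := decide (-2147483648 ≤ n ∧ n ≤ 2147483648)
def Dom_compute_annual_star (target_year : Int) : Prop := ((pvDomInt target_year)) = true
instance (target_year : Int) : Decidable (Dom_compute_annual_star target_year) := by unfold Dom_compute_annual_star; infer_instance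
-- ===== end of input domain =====

-- B replaces A's string-based digit sums and while-loop by arithmetic %10 // 10 digit sums and a
-- recursive fixpoint reduce; objective: alternative decomposition, equivalence of RETURN values.

-- ===== PORT A =====
-- sum(int(d) for d in str(n)); the per-char int(d) is ported by hand as c.toNat - 48,
-- exact whenever every character of str(n) is a digit, i.e. for n ≥ 0 (Pre_ excludes n < 0,
-- where Python's int('-') raises ValueError).
def dsA (n : Int) : Int := ((PySem.Int.toChars n).map (fun c => ((c.toNat : Int) - 48))).sum

-- the while-loop of A, with a fuel guard for totality only (fuel is always sufficient under Pre_)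
def loopA : Nat → Int → Int
  | 0, n => n
  | (f+1), n => if n > 10 then loopA f (dsA n) else n

def compute_annual_star (target_year : Int) : Int :=
  let n0 := dsA target_year
  let n := loopA (n0.toNat + 1) n0
  let star := 11 - n
  if star ≤ 0 then star + 9 else star

-- ===== PORT B =====
-- Source B's digit_sum: while n > 0: s += n % 10; n //= 10.  For n ≤ 0 the loop body never runs
-- (result 0 = digitSumNat n.toNat); for n > 0 Python's % and // on positives agree with Nat % and /.
def digitSumNat : Nat → Nat
  | 0 => 0
  | (n+1) => (n+1) % 10 + digitSumNat ((n+1) / 10)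
decreasing_by exact Nat.div_lt_self (Nat.succ_pos n) (by omega)

def pyDigitSum (n : Int) : Int := (digitSumNat n.toNat : Int)

theorem digitSumNat_le (m : Nat) : digitSumNat m ≤ m := by
  induction m using Nat.strong_induction_on with
  | _ m ih =>
    match m with
    | 0 => simp [digitSumNat]
    | (k+1) =>
      rw [digitSumNat]
      have h1 := ih ((k+1)/10) (Nat.div_lt_self (Nat.succ_pos k) (by omega))
      have h2 := Nat.div_add_mod (k+1) 10
      omega

theorem digitSumNat_lt (m : Nat) (hm : 10 ≤ m) : digitSumNat m < m := by
  match m, hm with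
  | (k+1), hm =>
    rw [digitSumNat]
    have h1 := digitSumNat_le ((k+1)/10)
    have h2 := Nat.div_add_mod (k+1) 10
    have h3 : 1 ≤ (k+1)/10 := Nat.one_le_div_iff (by omega) |>.mpr hm
    omega

-- Source B's reduce: reduce(n) = n if n <= 10 else reduce(digit_sum(n))
def reduceFix (n : Int) : Int :=
  if n ≤ 10 then n else reduceFix (pyDigitSum n)
termination_by n.toNat
decreasing_by
  simp only [pyDigitSum, Int.toNat_natCast]
  have : 10 ≤ n.toNat := by omega
  have := digitSumNat_lt n.toNat (by omega)
  omega

def compute_annual_star_alt (target_year : Int) : Int :=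
  let star := 11 - reduceFix (pyDigitSum target_year)
  if star > 0 then star else star + 9

-- ===== PRECONDITION & SPEC =====
-- Pre_ excludes negative years: there str(target_year) starts with '-' and A raises ValueError.
def Pre_compute_annual_star (target_year : Int) : Prop := 0 ≤ target_year
instance (target_year : Int) : Decidable (Pre_compute_annual_star target_year) := by
  unfold Pre_compute_annual_star; infer_instance
def pvWitness_compute_annual_star : Int := (2024)

def Spec_compute_annual_star (target_year : Int) (out : Int) : Prop := out = compute_annual_star_alt target_year
instance (target_year : Int) (out : Int) : Decidable (Spec_compute_annual_star target_year out) := by unfold Spec_compute_annual_star; infer_instance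

-- ===== CLAIM (what is proved, stated in full; the proofs are below) =====
def Claim_equal_compute_annual_star : Prop := ∀ (target_year : Int), Dom_compute_annual_star target_year → Pre_compute_annual_star target_year → Spec_compute_annual_star target_year (compute_annual_star target_year)

-- ===== LEMMAS AND PROOFS =====

theorem digitChar_val (r : Nat) (hr : r < 10) :
    ((Nat.digitChar r).toNat : Int) - 48 = (r : Int) := by
  interval_cases r <;> rfl

theorem sum_toDigitsCore (f : Nat) : ∀ (n : Nat) (acc : List Char), n < f →
    ((Nat.toDigitsCore 10 f n acc).map (fun c => ((c.toNat : Int) - 48))).sum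
      = (digitSumNat n : Int) + (acc.map (fun c => ((c.toNat : Int) - 48))).sum := by
  induction f with
  | zero => intro n acc h; omega
  | succ f ih =>
    intro n acc h
    rw [Nat.toDigitsCore]
    by_cases hd : n / 10 = 0
    · have hn : n < 10 := by
        rcases Nat.lt_or_ge n 10 with h10 | h10
        · exact h10
        · exact absurd hd (by have := Nat.one_le_div_iff (by omega) |>.mpr h10; omega)
      simp only [hd, if_pos, List.map_cons, List.sum_cons]
      rw [digitChar_val (n % 10) (Nat.mod_lt _ (by omega))]
      have hds : (digitSumNat n : Int) = (n % 10 : Nat) := by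
        match n with
        | 0 => simp [digitSumNat]
        | (k+1) => rw [digitSumNat]; rw [hd]; simp [digitSumNat]
      rw [hds]
    · have hn10 : 10 ≤ n := by
        by_contra hc
        exact hd (Nat.div_eq_of_lt (by omega))
      simp only [hd, if_false]
      rw [ih (n / 10) _ (by have := Nat.div_lt_self (by omega : 0 < n) (by omega : 1 < 10); omega)]
      simp only [List.map_cons, List.sum_cons]
      rw [digitChar_val (n % 10) (Nat.mod_lt _ (by omega))]
      have hds : (digitSumNat n : Int) = (n % 10 : Nat) + (digitSumNat (n / 10) : Int) := by
        match n, hn10 with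
        | (k+1), _ => rw [digitSumNat]; push_cast; ring
      rw [hds]; ring

theorem dsA_eq (n : Int) (hn : 0 ≤ n) : dsA n = pyDigitSum n := by
  unfold dsA pyDigitSum PySem.Int.toChars
  rw [if_neg (by omega)]
  unfold Nat.toDigits
  rw [sum_toDigitsCore (n.toNat + 1) n.toNat [] (by omega)]
  simp

theorem pyDigitSum_nonneg (n : Int) : 0 ≤ pyDigitSum n := by
  unfold pyDigitSum; positivity

theorem loopA_eq_reduceFix (f : Nat) : ∀ (n : Int), 0 ≤ n → n ≤ 10 + f →
    loopA f n = reduceFix n := by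
  induction f with
  | zero =>
    intro n h0 h10
    rw [loopA, reduceFix, if_pos (by omega)]
  | succ f ih =>
    intro n h0 hle
    rw [loopA]
    by_cases hgt : n > 10
    · rw [if_pos hgt, reduceFix, if_neg (by omega)]
      rw [dsA_eq n h0]
      have hlt : pyDigitSum n < n := by
        have h1 : 10 ≤ n.toNat := by omega
        have h2 := digitSumNat_lt n.toNat (by omega)
        unfold pyDigitSum
        omega
      exact ih (pyDigitSum n) (pyDigitSum_nonneg n) (by omega)
    · rw [if_neg hgt, reduceFix, if_pos (by omega)]

-- ===== VERDICT (by name: the statement is the Claim_ definition above) =====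
theorem compute_annual_star_spec : Claim_equal_compute_annual_star := by
  intro y _ hpre
  unfold Spec_compute_annual_star compute_annual_star compute_annual_star_alt
  have hds := dsA_eq y hpre
  have h0 := pyDigitSum_nonneg y
  have hl := loopA_eq_reduceFix ((pyDigitSum y).toNat + 1) (pyDigitSum y) h0 (by omega)
  dsimp only
  rw [hds, hl]
  by_cases h : 11 - reduceFix (pyDigitSum y) ≤ 0 <;> simp [h] <;> omega
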